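-- pv_equiv track=rewrite | github.com/DangerBirdStrikesAgain/FinalYearDissertation | MACEpidemic/epidemic.py | removeLowestMessage
-- ===== SOURCE A (Python) =====
-- def removeLowestMessage(messages: dict) -> dict:
--     """
--     Removes the item in the messages dict with the lowest TTL
--
--     Args:
--         messages (dict): The dictionary of messages
--
--     Returns:
--         dict: The dictionary of messages, with the message with the lowest TTL removed
--     """
--
--     messagesList = list(messages.items())
--     lowest = messagesList[0][0]
--     lowestTTL = messagesList[0][1][1]
--
--     for item in messagesList:
--         if item[1][1] < lowestTTL:
--             lowestTTL = item[1][1]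
--             lowest = item[0]
--
--     del(messages[lowest])
--     return messages
-- ===== SOURCE B (Python) =====
-- def removeLowestMessage(messages: dict) -> dict:
--     """Remove the message with the lowest TTL (messages[key][1]); ties: earliest insertion wins."""
--     items_sorted = sorted(messages.items(), key=lambda kv: kv[1][1])
--     del messages[items_sorted[0][0]]
--     return messages
-- ===== Notes on version B (the rewrite author's own statement) =====
-- stated objective: alternative
-- what changed: Replaces the manual min-tracking scan with a stable sort of the items by TTL, deleting the key of the first sorted item; stability preserves A's first-wins tie-break.
import Mathlib
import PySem

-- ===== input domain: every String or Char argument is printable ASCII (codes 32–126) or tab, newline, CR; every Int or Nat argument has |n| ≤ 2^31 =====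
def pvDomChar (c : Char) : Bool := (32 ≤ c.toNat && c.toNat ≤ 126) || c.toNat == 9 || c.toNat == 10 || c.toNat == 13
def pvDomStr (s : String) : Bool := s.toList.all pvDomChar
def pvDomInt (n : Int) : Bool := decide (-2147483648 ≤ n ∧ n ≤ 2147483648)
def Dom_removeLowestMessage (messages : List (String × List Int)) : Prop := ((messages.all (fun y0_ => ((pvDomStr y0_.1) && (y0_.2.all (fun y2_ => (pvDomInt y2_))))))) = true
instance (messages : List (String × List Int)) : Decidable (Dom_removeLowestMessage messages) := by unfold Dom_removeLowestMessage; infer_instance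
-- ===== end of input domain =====

-- B replaces A's manual min-tracking scan by a stable sort on TTL and deletes the first sorted key
-- (objective: alternative, not faster). Both A and B mutate the input dict in place in Python; the
-- equivalence proved here is about the RETURN value (in both the returned dict is the mutated one).

-- ===== PORT A =====
-- TTL accessor: item[1][1]; pyGet? is none exactly where Python raises IndexError (excluded by Pre_)
def pvTTL (v : List Int) : Int := (PySem.List.pyGet? v 1).getD 0

def removeLowestMessage (messages : List (String × List Int)) : List (String × List Int) :=
  match messages with
  | [] => messages  -- Python raises IndexError on messagesList[0]; outside Pre_
  | m0 :: _ =>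
    let st := messages.foldl
      (fun (st : String × Int) item =>
        if pvTTL item.2 < st.2 then (item.1, pvTTL item.2) else st)
      (m0.1, pvTTL m0.2)
    (PySem.Dict.erase (PySem.Dict.mk messages) st.1).items

-- ===== PORT B =====
def removeLowestMessage_alt (messages : List (String × List Int)) : List (String × List Int) :=
  let itemsSorted := PySem.List.sorted messages (fun kv => pvTTL kv.2)
  match itemsSorted with
  | [] => messages  -- Python raises IndexError on items_sorted[0]; outside Pre_
  | kv :: _ => (PySem.Dict.erase (PySem.Dict.mk messages) kv.1).items

-- ===== PRECONDITION & SPEC =====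
-- Pre_ excludes exactly the inputs where Python A raises IndexError: the empty dict
-- (messagesList[0]) and any value list with fewer than two elements (item[1][1]).
def Pre_removeLowestMessage (messages : List (String × List Int)) : Prop :=
  messages ≠ [] ∧ ∀ kv ∈ messages, 2 ≤ kv.2.length
instance (messages : List (String × List Int)) : Decidable (Pre_removeLowestMessage messages) := by unfold Pre_removeLowestMessage; infer_instance

def pvWitness_removeLowestMessage : (List (String × List Int)) := [("a", [0, 5]), ("b", [1, 3])]

def Spec_removeLowestMessage (messages : List (String × List Int)) (out : List (String × List Int)) : Prop := out = removeLowestMessage_alt messages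
instance (messages : List (String × List Int)) (out : List (String × List Int)) : Decidable (Spec_removeLowestMessage messages out) := by unfold Spec_removeLowestMessage; infer_instance

-- ===== CLAIM (what is proved, stated in full; the proofs are below) =====
def Claim_equal_removeLowestMessage : Prop := ∀ (messages : List (String × List Int)), Dom_removeLowestMessage messages → Pre_removeLowestMessage messages → Spec_removeLowestMessage messages (removeLowestMessage messages)

-- ===== LEMMAS AND PROOFS =====

-- the min?-shaped fold step on an optional current minimum
def pvFmin? (o : Option (String × List Int)) (x : String × List Int) : Option (String × List Int) :=
  match o with
  | none => some x
  | some m => if pvTTL x.2 < pvTTL m.2 then some x else some m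

-- first-minimum fold (what both programs select)
def pvFmin (m x : String × List Int) : String × List Int :=
  if pvTTL x.2 < pvTTL m.2 then x else m

theorem pv_head_insertBy (x : String × List Int) (ys : List (String × List Int)) :
    (PySem.List.insertBy (fun a b => decide (pvTTL a.2 < pvTTL b.2)) x ys).head? =
      pvFmin? ys.head? x := by
  cases ys with
  | nil => simp [PySem.List.insertBy, pvFmin?]
  | cons y t =>
      simp only [PySem.List.insertBy, pvFmin?, List.head?]
      split_ifs with h <;> simp_all

theorem pv_head_foldl_insertBy (l : List (String × List Int)) :
    ∀ acc : List (String × List Int),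
      (l.foldl (fun acc x => PySem.List.insertBy (fun a b => decide (pvTTL a.2 < pvTTL b.2)) x acc) acc).head? =
        l.foldl pvFmin? acc.head? := by
  induction l with
  | nil => intro acc; rfl
  | cons x t ih =>
      intro acc
      simp only [List.foldl_cons]
      rw [ih, pv_head_insertBy]

theorem pv_foldl_Fmin?_some (l : List (String × List Int)) :
    ∀ m, l.foldl pvFmin? (some m) = some (l.foldl pvFmin m) := by
  induction l with
  | nil => intro m; rfl
  | cons x t ih =>
      intro m
      simp only [List.foldl_cons, pvFmin?, pvFmin]
      split_ifs <;> exact ih _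

-- head of B's stable sort = first element of minimal TTL = result of the min?-shaped fold
theorem pv_head_sorted (m0 : String × List Int) (t : List (String × List Int)) :
    (PySem.List.sorted (m0 :: t) (fun kv => pvTTL kv.2)).head? = some (t.foldl pvFmin m0) := by
  rw [PySem.List.sorted_eq_foldl_insertBy, pv_head_foldl_insertBy]
  simp only [List.foldl_cons, pvFmin?]
  exact pv_foldl_Fmin?_some t m0

-- A's pair-tracking fold is the projection of the first-minimum fold
theorem pv_foldl_pair (l : List (String × List Int)) :
    ∀ m : String × List Int,
      l.foldl (fun (st : String × Int) item =>
          if pvTTL item.2 < st.2 then (item.1, pvTTL item.2) else st) (m.1, pvTTL m.2)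
        = ((l.foldl pvFmin m).1, pvTTL (l.foldl pvFmin m).2) := by
  induction l with
  | nil => intro m; rfl
  | cons x t ih =>
      intro m
      simp only [List.foldl_cons, pvFmin]
      split_ifs with h
      · exact ih x
      · exact ih m

-- ===== VERDICT (by name: the statement is the Claim_ definition above) =====
theorem removeLowestMessage_spec : Claim_equal_removeLowestMessage := by
  intro messages _ _
  unfold Spec_removeLowestMessage removeLowestMessage removeLowestMessage_alt
  cases messages with
  | nil => rfl
  | cons m0 t =>
      have hs := pv_head_sorted m0 t
      cases hsort : PySem.List.sorted (m0 :: t) (fun kv => pvTTL kv.2) with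
      | nil => simp [hsort] at hs
      | cons kv rest =>
          rw [hsort] at hs
          simp only [List.head?] at hs
          simp only [List.foldl_cons]
          have h0 : (if pvTTL m0.2 < pvTTL m0.2 then (m0.1, pvTTL m0.2) else (m0.1, pvTTL m0.2))
              = (m0.1, pvTTL m0.2) := by split_ifs <;> rfl
          rw [h0, pv_foldl_pair t m0]
          rw [(Option.some.inj hs).symm]
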